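-- pv_equiv track=rewrite | github.com/mousomer/tet4d | tetris_nd/playbot/planner_nd.py | _top_by_column
-- ===== SOURCE A (Python) =====
-- def _column_key(coord: tuple[int, ...], lateral_axes: tuple[int, ...]) -> tuple[int, ...]:
--     return tuple(coord[axis] for axis in lateral_axes)
--
-- def _top_by_column(
--     cells: dict[tuple[int, ...], int],
--     lateral_axes: tuple[int, ...],
--     gravity_axis: int,
-- ) -> dict[tuple[int, ...], int]:
--     top_by_col: dict[tuple[int, ...], int] = {}
--     for coord in cells:
--         column = _column_key(coord, lateral_axes)
--         g_val = coord[gravity_axis]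
--         prev = top_by_col.get(column)
--         if prev is None or g_val < prev:
--             top_by_col[column] = g_val
--     return top_by_col
-- ===== SOURCE B (Python) =====
-- def _column_key(coord, lateral_axes):
--     return tuple(coord[axis] for axis in lateral_axes)
--
-- def _top_by_column(cells, lateral_axes, gravity_axis):
--     # group all gravity values per lateral column, then reduce each group with min
--     groups = {}
--     for coord in cells:
--         col = _column_key(coord, lateral_axes)
--         groups[col] = groups.get(col, []) + [coord[gravity_axis]]
--     return {col: min(vals) for col, vals in groups.items()}
-- ===== Notes on version B (the rewrite author's own statement) =====
-- stated objective: alternative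
-- what changed: Replaces A's single incremental running-min update pass with a group-then-reduce pipeline: one pass collects every gravity value per lateral column into lists, then a dict comprehension reduces each group with min.
import Mathlib
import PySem

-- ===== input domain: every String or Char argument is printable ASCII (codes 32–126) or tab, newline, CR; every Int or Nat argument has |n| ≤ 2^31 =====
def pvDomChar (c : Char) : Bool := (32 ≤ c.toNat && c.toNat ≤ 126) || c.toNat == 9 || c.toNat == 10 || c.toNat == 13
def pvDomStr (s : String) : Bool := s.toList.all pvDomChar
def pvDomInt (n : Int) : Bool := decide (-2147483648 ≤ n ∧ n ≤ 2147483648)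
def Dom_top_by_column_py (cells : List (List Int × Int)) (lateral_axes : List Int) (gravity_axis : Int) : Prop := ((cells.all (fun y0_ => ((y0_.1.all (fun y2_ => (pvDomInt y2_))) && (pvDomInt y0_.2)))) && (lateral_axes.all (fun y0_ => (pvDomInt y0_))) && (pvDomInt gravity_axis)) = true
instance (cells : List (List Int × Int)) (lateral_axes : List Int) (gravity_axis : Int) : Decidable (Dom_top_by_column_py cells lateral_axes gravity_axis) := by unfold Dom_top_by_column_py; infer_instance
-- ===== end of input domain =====

-- B replaces A's incremental running-min pass by a group-then-reduce pipeline (collect all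
-- gravity values per column, then min per group); objective: alternative (same cost).

-- ===== PORT A =====
-- _column_key(coord, lateral_axes): tuple(coord[axis] for axis in lateral_axes)
-- (index defaulted to 0 on out-of-range; Python raises there, excluded by Pre_)
def pvColumnKey (coord : List Int) (lateral_axes : List Int) : List Int :=
  lateral_axes.map (fun axis => (PySem.List.pyGet? coord axis).getD 0)

def top_by_column_py (cells : List (List Int × Int)) (lateral_axes : List Int) (gravity_axis : Int) : List (List Int × Int) :=
  let top_by_col : PySem.Dict (List Int) Int :=
    ((PySem.Dict.ofList cells).keys).foldl (fun top_by_col coord =>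
      let column := pvColumnKey coord lateral_axes
      let g_val := (PySem.List.pyGet? coord gravity_axis).getD 0
      match top_by_col.get? column with
      | none => top_by_col.insert column g_val
      | some prev => if g_val < prev then top_by_col.insert column g_val else top_by_col)
      PySem.Dict.empty
  top_by_col.items

-- ===== PORT B =====
def top_by_column_py_alt (cells : List (List Int × Int)) (lateral_axes : List Int) (gravity_axis : Int) : List (List Int × Int) :=
  let groups : PySem.Dict (List Int) (List Int) :=
    ((PySem.Dict.ofList cells).keys).foldl (fun groups coord =>
      let col := pvColumnKey coord lateral_axes
      groups.insert col (groups.getD col [] ++ [(PySem.List.pyGet? coord gravity_axis).getD 0]))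
      PySem.Dict.empty
  groups.items.map (fun p => (p.1, (PySem.List.min? p.2 (fun x => x)).getD 0))

-- ===== PRECONDITION & SPEC =====
-- Pre_ excludes exactly the inputs where Python A raises IndexError: some coordinate key
-- indexed out of range (Python-style, negative allowed) by a lateral axis or the gravity axis.
def Pre_top_by_column_py (cells : List (List Int × Int)) (lateral_axes : List Int) (gravity_axis : Int) : Prop :=
  ∀ p ∈ cells, (∀ a ∈ lateral_axes, PySem.Raise.InRange p.1.length a) ∧ PySem.Raise.InRange p.1.length gravity_axis
instance (cells : List (List Int × Int)) (lateral_axes : List Int) (gravity_axis : Int) : Decidable (Pre_top_by_column_py cells lateral_axes gravity_axis) := by unfold Pre_top_by_column_py; infer_instance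

def pvWitness_top_by_column_py : (List (List Int × Int)) × List Int × Int :=
  ([([0, 2], 1), ([0, 3], 1), ([1, 2], 1)], [0], 1)

def Spec_top_by_column_py (cells : List (List Int × Int)) (lateral_axes : List Int) (gravity_axis : Int) (out : List (List Int × Int)) : Prop := out = top_by_column_py_alt cells lateral_axes gravity_axis
instance (cells : List (List Int × Int)) (lateral_axes : List Int) (gravity_axis : Int) (out : List (List Int × Int)) : Decidable (Spec_top_by_column_py cells lateral_axes gravity_axis out) := by unfold Spec_top_by_column_py; infer_instance

-- ===== CLAIM (what is proved, stated in full; the proofs are below) =====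
def Claim_equal_top_by_column_py : Prop := ∀ (cells : List (List Int × Int)) (lateral_axes : List Int) (gravity_axis : Int), Dom_top_by_column_py cells lateral_axes gravity_axis → Pre_top_by_column_py cells lateral_axes gravity_axis → Spec_top_by_column_py cells lateral_axes gravity_axis (top_by_column_py cells lateral_axes gravity_axis)

-- ===== LEMMAS AND PROOFS =====

-- min(vals) as B computes it
def pvMinD (vs : List Int) : Int := (PySem.List.min? vs (fun x => x)).getD 0

-- the group dict mapped through min, as a Dict
def pvMapMin (d : PySem.Dict (List Int) (List Int)) : PySem.Dict (List Int) Int :=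
  PySem.Dict.mk (d.items.map (fun p => (p.1, pvMinD p.2)))

theorem pvMapMin_get? (d : PySem.Dict (List Int) (List Int)) (c : List Int) :
    (pvMapMin d).get? c = (d.get? c).map pvMinD := by
  obtain ⟨l⟩ := d
  induction l with
  | nil => rfl
  | cons p t ih =>
    obtain ⟨k, v⟩ := p
    simp only [pvMapMin, List.map_cons] at ih ⊢
    rw [PySem.Dict.get?_mk_cons, PySem.Dict.get?_mk_cons]
    by_cases h : (k == c) = true
    · simp [h]
    · simp only [h]
      exact ih

theorem pvMapMin_items (d : PySem.Dict (List Int) (List Int)) :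
    (pvMapMin d).items = d.items.map (fun p => (p.1, pvMinD p.2)) := rfl

theorem pvMapMin_keys (d : PySem.Dict (List Int) (List Int)) :
    (pvMapMin d).keys = d.keys := by
  simp [PySem.Dict.keys, pvMapMin_items]

theorem pvMapMin_contains (d : PySem.Dict (List Int) (List Int)) (c : List Int) :
    (pvMapMin d).contains c = d.contains c := by
  rw [PySem.Dict.contains_eq_decide_mem_keys, PySem.Dict.contains_eq_decide_mem_keys,
    pvMapMin_keys]

theorem pvMapMin_insert (d : PySem.Dict (List Int) (List Int)) (c : List Int) (vs : List Int) :
    pvMapMin (d.insert c vs) = (pvMapMin d).insert c (pvMinD vs) := by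
  apply PySem.Dict.ext
  rw [pvMapMin_items, PySem.Dict.items_insert, PySem.Dict.items_insert, pvMapMin_contains]
  by_cases h : d.contains c = true
  · rw [if_pos h, if_pos h, List.map_map, pvMapMin_items, List.map_map]
    apply List.map_congr_left
    intro p _
    by_cases hp : (p.1 == c) = true
    · have hc : p.1 = c := by simpa using hp
      simp [Function.comp, hc]
    · simp [Function.comp, hp]
  · rw [if_neg h, if_neg h, List.map_append, pvMapMin_items]
    rfl

theorem insert_same_eq_self (d : PySem.Dict (List Int) Int) (c : List Int) (v : Int)
    (hnd : d.keys.Nodup) (h : d.get? c = some v) : d.insert c v = d := by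
  apply PySem.Dict.ext
  rw [PySem.Dict.items_insert_of_contains d v
    (by rw [PySem.Dict.contains_eq_isSome_get?, h]; rfl)]
  refine (List.map_congr_left ?_).trans (List.map_id _)
  intro p hp
  by_cases hpc : (p.1 == c) = true
  · have hc : p.1 = c := by simpa using hpc
    have hmem : (p.1, p.2) ∈ d.items := by simpa using hp
    have hv : d.get? p.1 = some p.2 := PySem.Dict.get?_of_mem_items d hmem hnd
    rw [hc, h] at hv
    have : v = p.2 := Option.some_inj.mp hv
    simp only [hpc, if_true]
    rw [← hc, this]
    rfl
  · simp [hpc]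

theorem pvMinD_singleton (g : Int) : pvMinD [g] = g := by
  simp [pvMinD, PySem.List.min?_id_cons]

theorem pvMinD_append (vs : List Int) (g : Int) (h : vs ≠ []) :
    pvMinD (vs ++ [g]) = if g < pvMinD vs then g else pvMinD vs := by
  obtain ⟨x, t, rfl⟩ := List.exists_cons_of_ne_nil h
  simp only [pvMinD, List.cons_append, PySem.List.min?_id_cons, Option.getD_some,
    List.foldl_append, List.foldl_cons, List.foldl_nil]
  rcases le_or_gt (List.foldl min x t) g with hle | hlt
  · rw [min_eq_left hle, if_neg (by omega)]
  · rw [min_eq_right (le_of_lt hlt), if_pos hlt]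

theorem pvValuesNonempty_empty :
    ∀ p ∈ (PySem.Dict.empty : PySem.Dict (List Int) (List Int)).items, p.2 ≠ [] := by
  intro p hp; cases hp

-- the central invariant: folding A's step over ks from the min-image of dB equals
-- the min-image of folding B's grouping step over ks from dB
theorem pv_fold_inv (lateral_axes : List Int) (gravity_axis : Int) :
    ∀ (ks : List (List Int)) (dB : PySem.Dict (List Int) (List Int)),
      dB.keys.Nodup → (∀ p ∈ dB.items, p.2 ≠ []) →
      ks.foldl (fun top_by_col coord =>
        let column := pvColumnKey coord lateral_axes
        let g_val := (PySem.List.pyGet? coord gravity_axis).getD 0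
        match top_by_col.get? column with
        | none => top_by_col.insert column g_val
        | some prev => if g_val < prev then top_by_col.insert column g_val else top_by_col)
        (pvMapMin dB)
      = pvMapMin (ks.foldl (fun groups coord =>
          let col := pvColumnKey coord lateral_axes
          groups.insert col (groups.getD col [] ++ [(PySem.List.pyGet? coord gravity_axis).getD 0]))
          dB) := by
  intro ks
  induction ks with
  | nil => intro dB _ _; rfl
  | cons coord ks ih =>
    intro dB hnd hne
    simp only [List.foldl_cons]
    set c := pvColumnKey coord lateral_axes with hc
    set g := (PySem.List.pyGet? coord gravity_axis).getD 0 with hg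
    have hstep :
        (match (pvMapMin dB).get? c with
         | none => (pvMapMin dB).insert c g
         | some prev => if g < prev then (pvMapMin dB).insert c g else pvMapMin dB)
        = pvMapMin (dB.insert c (dB.getD c [] ++ [g])) := by
      cases hget : dB.get? c with
      | none =>
        have hA : (pvMapMin dB).get? c = none := by rw [pvMapMin_get?, hget]; rfl
        simp only [hA]
        rw [PySem.Dict.getD_of_get?_eq_none dB [] hget, pvMapMin_insert]
        simp [pvMinD_singleton]
      | some vs =>
        have hvs : vs ≠ [] := hne (c, vs) (PySem.Dict.mem_items_of_get?_eq_some dB hget)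
        have hA : (pvMapMin dB).get? c = some (pvMinD vs) := by rw [pvMapMin_get?, hget]; rfl
        simp only [hA]
        rw [PySem.Dict.getD_of_get?_eq_some dB [] hget, pvMapMin_insert, pvMinD_append vs g hvs]
        by_cases hlt : g < pvMinD vs
        · rw [if_pos hlt, if_pos hlt]
        · rw [if_neg hlt, if_neg hlt]
          exact (insert_same_eq_self (pvMapMin dB) c (pvMinD vs)
            (by rw [pvMapMin_keys]; exact hnd) hA).symm
    rw [hstep]
    apply ih
    · exact PySem.Dict.nodup_keys_insert _ _ _ hnd
    · intro p hp
      rcases (PySem.Dict.mem_items_insert _ _ _ _).mp hp with hpe | ⟨hpm, _⟩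
      · rw [hpe]; simp
      · exact hne p hpm

-- ===== VERDICT (by name: the statement is the Claim_ definition above) =====
theorem top_by_column_py_spec : Claim_equal_top_by_column_py := by
  intro cells lateral_axes gravity_axis _ _
  unfold Spec_top_by_column_py top_by_column_py top_by_column_py_alt
  have h := pv_fold_inv lateral_axes gravity_axis ((PySem.Dict.ofList cells).keys)
    PySem.Dict.empty (PySem.Dict.nodup_keys_empty) pvValuesNonempty_empty
  simp only [show pvMapMin PySem.Dict.empty = PySem.Dict.empty from rfl] at h
  rw [h]
  rfl
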